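-- pv_equiv track=rewrite | github.com/dhakshitha29/ResumeAnalyzer | resumeAnalyzer/app/services/question_generator.py | generate_activity_questions
-- ===== SOURCE A (Python) =====
-- def generate_activity_questions(activities):
--     activity_questions = []
--
--     for activity in activities:
--         if "hackathon" in activity.lower():
--             activity_questions.append("Can you describe your role in the hackathon and the challenges you faced?")
--         elif "workshop" in activity.lower():
--             activity_questions.append("What were the key takeaways from the workshop?")
--         elif "competition" in activity.lower():
--             activity_questions.append("What strategies did you use to succeed in the competition?")
--         elif "contest" in activity.lower():
--             activity_questions.append("Can you describe an event where you collaborated with a diverse team?")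
--         elif "event" in activity.lower():
--             activity_questions.append("How do you ensure quality work while working under pressure in a contest?")
--
--     return activity_questions
-- ===== SOURCE B (Python) =====
-- _TABLE = [
--     ("hackathon", "Can you describe your role in the hackathon and the challenges you faced?"),
--     ("workshop", "What were the key takeaways from the workshop?"),
--     ("competition", "What strategies did you use to succeed in the competition?"),
--     ("contest", "Can you describe an event where you collaborated with a diverse team?"),
--     ("event", "How do you ensure quality work while working under pressure in a contest?"),
-- ]
--
-- def generate_activity_questions(activities):
--     # Keyword-major staged passes: one pass over the activities per keyword,
--     # in priority order, filling only still-empty slots; earlier keywords win.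
--     lows = [a.lower() for a in activities]
--     slots = [None] * len(lows)
--     for kw, q in _TABLE:
--         slots = [q if cur is None and kw in lo else cur
--                  for lo, cur in zip(lows, slots)]
--     return [q for q in slots if q is not None]
-- ===== Notes on version B (the rewrite author's own statement) =====
-- stated objective: alternative
-- what changed: Inverts the loop nesting: instead of scanning the if/elif keyword chain per activity, B makes one staged pass over the activities per keyword in priority order, filling only still-empty slots, then compacts the slot list.
import Mathlib
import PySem

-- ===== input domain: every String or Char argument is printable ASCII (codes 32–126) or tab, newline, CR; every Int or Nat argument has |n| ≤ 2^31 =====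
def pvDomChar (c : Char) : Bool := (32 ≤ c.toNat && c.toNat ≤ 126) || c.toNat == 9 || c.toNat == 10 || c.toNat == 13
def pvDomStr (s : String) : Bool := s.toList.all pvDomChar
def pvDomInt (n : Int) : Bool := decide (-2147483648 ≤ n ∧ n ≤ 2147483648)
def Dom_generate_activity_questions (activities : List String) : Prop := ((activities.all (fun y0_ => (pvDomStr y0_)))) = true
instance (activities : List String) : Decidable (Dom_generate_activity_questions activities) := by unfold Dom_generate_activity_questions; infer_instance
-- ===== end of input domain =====

-- B inverts the loop nesting: one staged pass over the activities per keyword, in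
-- priority order, filling only still-empty slots, then compacting (alternative; same cost).

-- ===== PORT A =====
def generate_activity_questions (activities : List String) : List String :=
  activities.foldl (fun activity_questions activity =>
    if PySem.Str.isIn "hackathon" (PySem.Str.lower activity) then
      activity_questions ++ ["Can you describe your role in the hackathon and the challenges you faced?"]
    else if PySem.Str.isIn "workshop" (PySem.Str.lower activity) then
      activity_questions ++ ["What were the key takeaways from the workshop?"]
    else if PySem.Str.isIn "competition" (PySem.Str.lower activity) then
      activity_questions ++ ["What strategies did you use to succeed in the competition?"]
    else if PySem.Str.isIn "contest" (PySem.Str.lower activity) then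
      activity_questions ++ ["Can you describe an event where you collaborated with a diverse team?"]
    else if PySem.Str.isIn "event" (PySem.Str.lower activity) then
      activity_questions ++ ["How do you ensure quality work while working under pressure in a contest?"]
    else activity_questions) []

-- ===== PORT B =====
def pvTable : List (String × String) :=
  [("hackathon", "Can you describe your role in the hackathon and the challenges you faced?"),
   ("workshop", "What were the key takeaways from the workshop?"),
   ("competition", "What strategies did you use to succeed in the competition?"),
   ("contest", "Can you describe an event where you collaborated with a diverse team?"),
   ("event", "How do you ensure quality work while working under pressure in a contest?")]

-- one staged pass: [q if cur is None and kw in lo else cur for lo, cur in zip(lows, slots)]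
def pvPass (kwq : String × String) (pairs : List (String × Option String)) : List (Option String) :=
  pairs.map (fun p => if p.2.isNone && PySem.Str.isIn kwq.1 p.1 then some kwq.2 else p.2)

def generate_activity_questions_alt (activities : List String) : List String :=
  let lows := activities.map PySem.Str.lower
  let slots := pvTable.foldl (fun slots kwq => pvPass kwq (lows.zip slots))
    (lows.map (fun _ => none))
  slots.filterMap id

-- ===== PRECONDITION & SPEC =====
def Spec_generate_activity_questions (activities : List String) (out : List String) : Prop := out = generate_activity_questions_alt activities
instance (activities : List String) (out : List String) : Decidable (Spec_generate_activity_questions activities out) := by unfold Spec_generate_activity_questions; infer_instance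

-- ===== CLAIM (what is proved, stated in full; the proofs are below) =====
def Claim_equal_generate_activity_questions : Prop := ∀ (activities : List String), Dom_generate_activity_questions activities → Spec_generate_activity_questions activities (generate_activity_questions activities)

-- ===== LEMMAS AND PROOFS =====

-- one pass over zipped slots acts pointwise
theorem pvPass_map_self (kwq : String × String) (lows : List String)
    (g : String → Option String) :
    pvPass kwq (lows.zip (lows.map g))
      = lows.map (fun lo => if (g lo).isNone && PySem.Str.isIn kwq.1 lo then some kwq.2 else g lo) := by
  induction lows with
  | nil => rfl
  | cons a t ih =>
    simp only [List.map_cons, List.zip_cons_cons, pvPass, List.cons.injEq] at *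
    exact ⟨trivial, ih⟩

-- the whole keyword-major fold acts pointwise: per activity, fold the table
theorem pvFold_map (t : List (String × String)) (lows : List String) (g : String → Option String) :
    t.foldl (fun slots kwq => pvPass kwq (lows.zip slots)) (lows.map g)
      = lows.map (fun lo =>
          t.foldl (fun cur kwq => if cur.isNone && PySem.Str.isIn kwq.1 lo then some kwq.2 else cur) (g lo)) := by
  induction t generalizing g with
  | nil => rfl
  | cons kwq t ih =>
    rw [List.foldl_cons, pvPass_map_self kwq lows g, ih]
    rfl

-- per activity, folding the literal table from none equals A's if/elif chain
theorem pvChain_eq (lo : String) :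
    pvTable.foldl (fun cur kwq => if cur.isNone && PySem.Str.isIn kwq.1 lo then some kwq.2 else cur) none
      = (if PySem.Str.isIn "hackathon" lo then
           some "Can you describe your role in the hackathon and the challenges you faced?"
         else if PySem.Str.isIn "workshop" lo then
           some "What were the key takeaways from the workshop?"
         else if PySem.Str.isIn "competition" lo then
           some "What strategies did you use to succeed in the competition?"
         else if PySem.Str.isIn "contest" lo then
           some "Can you describe an event where you collaborated with a diverse team?"
         else if PySem.Str.isIn "event" lo then
           some "How do you ensure quality work while working under pressure in a contest?"
         else none) := by
  simp only [pvTable, List.foldl]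
  split_ifs <;> simp_all

-- A's accumulator fold, pulled out as append of a filterMap
theorem gaq_foldl_acc (activities : List String) (acc : List String) :
    activities.foldl (fun activity_questions activity =>
      if PySem.Str.isIn "hackathon" (PySem.Str.lower activity) then
        activity_questions ++ ["Can you describe your role in the hackathon and the challenges you faced?"]
      else if PySem.Str.isIn "workshop" (PySem.Str.lower activity) then
        activity_questions ++ ["What were the key takeaways from the workshop?"]
      else if PySem.Str.isIn "competition" (PySem.Str.lower activity) then
        activity_questions ++ ["What strategies did you use to succeed in the competition?"]
      else if PySem.Str.isIn "contest" (PySem.Str.lower activity) then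
        activity_questions ++ ["Can you describe an event where you collaborated with a diverse team?"]
      else if PySem.Str.isIn "event" (PySem.Str.lower activity) then
        activity_questions ++ ["How do you ensure quality work while working under pressure in a contest?"]
      else activity_questions) acc
    = acc ++ activities.filterMap (fun a =>
        if PySem.Str.isIn "hackathon" (PySem.Str.lower a) then
          some "Can you describe your role in the hackathon and the challenges you faced?"
        else if PySem.Str.isIn "workshop" (PySem.Str.lower a) then
          some "What were the key takeaways from the workshop?"
        else if PySem.Str.isIn "competition" (PySem.Str.lower a) then
          some "What strategies did you use to succeed in the competition?"
        else if PySem.Str.isIn "contest" (PySem.Str.lower a) then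
          some "Can you describe an event where you collaborated with a diverse team?"
        else if PySem.Str.isIn "event" (PySem.Str.lower a) then
          some "How do you ensure quality work while working under pressure in a contest?"
        else none) := by
  induction activities generalizing acc with
  | nil => simp
  | cons a t ih =>
    rw [List.foldl_cons, List.filterMap_cons, ih]
    split_ifs <;> simp [List.append_assoc]

set_option maxHeartbeats 1000000 in
-- B's staged-pass fold, reduced to a per-activity filterMap of the table fold
theorem alt_eq (activities : List String) :
    generate_activity_questions_alt activities
      = activities.filterMap (fun a =>
          pvTable.foldl (fun cur kwq =>
            if cur.isNone && PySem.Str.isIn kwq.1 (PySem.Str.lower a) then some kwq.2 else cur) none) := by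
  unfold generate_activity_questions_alt
  change List.filterMap id (pvTable.foldl
    (fun slots kwq => pvPass kwq ((activities.map PySem.Str.lower).zip slots))
    ((activities.map PySem.Str.lower).map (fun _ => none))) = _
  rw [pvFold_map pvTable (activities.map PySem.Str.lower) (fun _ => none)]
  simp only [List.filterMap_map, Function.comp_def, id_eq]

-- ===== VERDICT (by name: the statement is the Claim_ definition above) =====
set_option maxHeartbeats 1000000 in
theorem generate_activity_questions_spec : Claim_equal_generate_activity_questions := by
  intro activities _
  unfold Spec_generate_activity_questions generate_activity_questions
  rw [gaq_foldl_acc activities [], alt_eq activities]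
  simp only [List.nil_append]
  refine List.filterMap_congr ?_
  intro a _
  exact (pvChain_eq (PySem.Str.lower a)).symm
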